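-- pv_equiv track=rewrite | github.com/jercamadalina/string-theory | string_theory.py | is_blanagram
-- ===== SOURCE A (Python) =====
-- def text_process(text):
--     letters = []
--     for sign in text:
--         if sign.isalpha() is True:
--             letters.append(sign.lower())
--     text_processed = "".join(letters)
--     return text_processed
--
-- def is_blanagram(text1, text2):
--     text_processed_1 = text_process(text1)
--     text_processed_2 = text_process(text2)
--     if len(text_processed_1) != len(text_processed_2):
--         return False
--
--     dict1 = dict()
--     for letter in text_processed_1:
--         if letter in dict1.keys():
--             dict1[letter] += 1
--         else:
--             dict1[letter] = 1
--
--     dict2 = dict()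
--     for letter in text_processed_2:
--         if letter in dict2.keys():
--             dict2[letter] += 1
--         else:
--             dict2[letter] = 1
--
--     keys1 = list(dict1.keys())
--     for key in keys1:
--         if key in dict2.keys():
--             if dict1[key] == dict2[key]:
--                 dict1.pop(key)
--                 dict2.pop(key)
--     keys1 = list(dict1.keys())
--     diff_sum = 0
--     for key in keys1:
--         if key in dict2.keys():
--             value1 = dict1[key]
--             value2 = dict2[key]
--             diff = abs(value1-value2)
--             diff_sum += diff
--         else:
--             diff_sum += dict1[key]
--
--     for key in dict2.keys():
--         if key not in dict1.keys():
--             diff_sum += dict2[key]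
--
--     return diff_sum == 2
-- ===== SOURCE B (Python) =====
-- def is_blanagram(text1, text2):
--     s1 = [c.lower() for c in text1 if c.isalpha()]
--     s2 = [c.lower() for c in text2 if c.isalpha()]
--     if len(s1) != len(s2):
--         return False
--     rest = s1
--     for ch in s2:
--         if ch in rest:
--             rest.remove(ch)
--     return len(rest) == 1
-- ===== Notes on version B (the rewrite author's own statement) =====
-- stated objective: simpler
-- what changed: A builds two hand-rolled frequency dicts, runs a cancellation pass popping keys with equal counts, and sums remaining absolute count differences in two further loops comparing to 2; B never counts anything: it performs multiset subtraction by removing each character of the second processed string from the first (list.remove) and tests whether exactly one character is left over, which for equal-length strings is exactly the differ-by-one-letter condition.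
import Mathlib
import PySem

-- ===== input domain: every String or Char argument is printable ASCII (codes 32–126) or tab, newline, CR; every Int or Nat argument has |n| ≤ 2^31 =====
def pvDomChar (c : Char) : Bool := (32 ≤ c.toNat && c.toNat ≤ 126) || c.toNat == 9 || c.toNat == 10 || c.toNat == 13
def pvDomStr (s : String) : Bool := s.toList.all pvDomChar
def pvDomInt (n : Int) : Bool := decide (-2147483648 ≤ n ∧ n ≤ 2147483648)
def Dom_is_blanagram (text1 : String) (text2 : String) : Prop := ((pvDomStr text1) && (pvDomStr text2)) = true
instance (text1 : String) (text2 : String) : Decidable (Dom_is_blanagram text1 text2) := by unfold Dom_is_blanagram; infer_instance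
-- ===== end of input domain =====

-- B replaces A's build-two-dicts / cancel-equal-counts / two remainder-summation passes by a
-- count-free multiset subtraction: remove each character of the second processed string from the
-- first and test that exactly one character is left over (objective: simpler; B mutates only its
-- own local list, no caller-visible side effects).

-- ===== PORT A =====
-- text_process returns the processed text as its list of characters: the Python returns
-- "".join(letters), and the caller only takes len() of it and iterates its characters,
-- both of which read exactly this list.
def text_process (text : String) : List Char :=
  text.toList.foldl
    (fun letters sign =>
      if PySem.Chars.isalpha sign then letters ++ [PySem.Chars.lowerChar sign] else letters) []

-- dict.pop(key) is ported as Dict.erase (the popped value is discarded by the Python);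
-- dict1[key] on a key known to be present is ported as getD key 0.
def is_blanagram (text1 : String) (text2 : String) : Bool :=
  let t1 := text_process text1
  let t2 := text_process text2
  if t1.length ≠ t2.length then false
  else
    let d1 : PySem.Dict Char Int := t1.foldl
      (fun d letter => if d.contains letter then d.insert letter (d.getD letter 0 + 1)
                       else d.insert letter 1) PySem.Dict.empty
    let d2 : PySem.Dict Char Int := t2.foldl
      (fun d letter => if d.contains letter then d.insert letter (d.getD letter 0 + 1)
                       else d.insert letter 1) PySem.Dict.empty
    let keys1 := d1.keys
    let st := keys1.foldl
      (fun (s : PySem.Dict Char Int × PySem.Dict Char Int) key =>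
        if s.2.contains key then
          if s.1.getD key 0 = s.2.getD key 0 then (s.1.erase key, s.2.erase key) else s
        else s) (d1, d2)
    let keys1' := st.1.keys
    let diff_sum : Int := keys1'.foldl
      (fun acc key =>
        if st.2.contains key then acc + |st.1.getD key 0 - st.2.getD key 0|
        else acc + st.1.getD key 0) 0
    let diff_sum2 := st.2.keys.foldl
      (fun acc key => if !st.1.contains key then acc + st.2.getD key 0 else acc) diff_sum
    diff_sum2 == 2

-- ===== PORT B =====
-- 'ch in rest' → rest.contains ch; list.remove(ch) (first occurrence) → List.erase.
def is_blanagram_alt (text1 : String) (text2 : String) : Bool :=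
  let s1 := (text1.toList.filter PySem.Chars.isalpha).map PySem.Chars.lowerChar
  let s2 := (text2.toList.filter PySem.Chars.isalpha).map PySem.Chars.lowerChar
  if s1.length ≠ s2.length then false
  else (s2.foldl (fun rest ch => if rest.contains ch then rest.erase ch else rest) s1).length == 1

-- ===== PRECONDITION & SPEC =====
def Spec_is_blanagram (text1 : String) (text2 : String) (out : Bool) : Prop := out = is_blanagram_alt text1 text2
instance (text1 : String) (text2 : String) (out : Bool) : Decidable (Spec_is_blanagram text1 text2 out) := by unfold Spec_is_blanagram; infer_instance

-- ===== CLAIM (what is proved, stated in full; the proofs are below) =====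
def Claim_equal_is_blanagram : Prop := ∀ (text1 : String) (text2 : String), Dom_is_blanagram text1 text2 → Spec_is_blanagram text1 text2 (is_blanagram text1 text2)

-- ===== LEMMAS AND PROOFS =====
lemma text_process_eq (t : String) :
    text_process t = (t.toList.filter PySem.Chars.isalpha).map PySem.Chars.lowerChar := by
  simpa [text_process] using
    PySem.List.foldl_append_if PySem.Chars.isalpha PySem.Chars.lowerChar t.toList []

lemma count_fold_eq (l : List Char) :
    l.foldl (fun d letter => if d.contains letter then d.insert letter (d.getD letter 0 + 1)
      else d.insert letter 1) PySem.Dict.empty = PySem.Dict.counter l := by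
  rw [← PySem.Dict.foldl_insert_getD_add_one_eq_counter]
  apply PySem.List.foldl_congr_mem'
  intro x _ d
  by_cases h : d.contains x
  · simp [h]
  · simp [h, PySem.Dict.getD_of_not_contains d 0 (by simpa using h)]

lemma get?_erase_of_ne {ν : Type} (d : PySem.Dict Char ν) (k c : Char) (h : c ≠ k) :
    (d.erase k).get? c = d.get? c := by
  obtain ⟨items⟩ := d
  induction items with
  | nil => rfl
  | cons p rest ih =>
    simp only [PySem.Dict.erase, PySem.Dict.get?] at ih ⊢
    by_cases hp : p.1 = k
    · have h2 : (p.1 == c) = false := beq_eq_false_iff_ne.mpr (fun e => h (e ▸ hp))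
      rw [show (List.filter (fun q => !q.1 == k) (p :: rest))
            = List.filter (fun q => !q.1 == k) rest from by simp [hp],
        List.find?_cons_of_neg (by simp [h2])]
      exact ih
    · rw [show (List.filter (fun q => !q.1 == k) (p :: rest))
            = p :: List.filter (fun q => !q.1 == k) rest from by simp [hp]]
      by_cases hc : p.1 = c
      · rw [List.find?_cons_of_pos (by simpa using hc), List.find?_cons_of_pos (by simpa using hc)]
      · rw [List.find?_cons_of_neg (by simpa using hc), List.find?_cons_of_neg (by simpa using hc)]
        exact ih

lemma contains_erase_of_ne {ν : Type} (d : PySem.Dict Char ν) (k c : Char) (h : c ≠ k) :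
    (d.erase k).contains c = d.contains c := by
  rw [PySem.Dict.contains_eq_isSome_get?, PySem.Dict.contains_eq_isSome_get?,
    get?_erase_of_ne d k c h]

lemma getD_erase_of_ne {ν : Type} (d : PySem.Dict Char ν) (k c : Char) (v : ν) (h : c ≠ k) :
    (d.erase k).getD c v = d.getD c v := by
  rw [PySem.Dict.getD_eq_get?_getD, PySem.Dict.getD_eq_get?_getD, get?_erase_of_ne d k c h]

def cancelCond (a b : PySem.Dict Char Int) (k : Char) : Bool :=
  b.contains k && (a.getD k 0 == b.getD k 0)

lemma cancelCond_erase (a b : PySem.Dict Char Int) (k c : Char) (h : c ≠ k) :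
    cancelCond (a.erase k) (b.erase k) c = cancelCond a b c := by
  simp [cancelCond, contains_erase_of_ne _ _ _ h, getD_erase_of_ne _ _ _ _ h]

lemma cancel_fold (ks : List Char) (hnd : ks.Nodup) (a b : PySem.Dict Char Int) :
    ks.foldl (fun s key =>
        if s.2.contains key then
          if s.1.getD key 0 = s.2.getD key 0 then (s.1.erase key, s.2.erase key) else s
        else s) (a, b)
    = (PySem.Dict.mk (a.items.filter (fun p => !(ks.contains p.1 && cancelCond a b p.1))),
       PySem.Dict.mk (b.items.filter (fun p => !(ks.contains p.1 && cancelCond a b p.1)))) := by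
  induction ks generalizing a b with
  | nil => simp
  | cons k rest ih =>
    have hk : k ∉ rest := (List.nodup_cons.mp hnd).1
    have hrest : rest.Nodup := (List.nodup_cons.mp hnd).2
    simp only [List.foldl_cons]
    by_cases hc : cancelCond a b k
    · obtain ⟨hbc, heq⟩ : b.contains k = true ∧ a.getD k 0 = b.getD k 0 := by
        simpa [cancelCond] using hc
      rw [show (if (a, b).2.contains k = true then
          if (a, b).1.getD k 0 = (a, b).2.getD k 0 then ((a, b).1.erase k, (a, b).2.erase k)
          else (a, b) else (a, b)) = (a.erase k, b.erase k) by simp [hbc, heq]]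
      rw [ih hrest]
      have hpred : ∀ (d : PySem.Dict Char Int),
          (d.erase k).items.filter
              (fun p => !(rest.contains p.1 && cancelCond (a.erase k) (b.erase k) p.1))
            = d.items.filter (fun p => !((k :: rest).contains p.1 && cancelCond a b p.1)) := by
        intro d
        show (d.items.filter (fun p => !(p.1 == k))).filter _ = _
        rw [List.filter_filter]
        apply List.filter_congr
        intro p _
        by_cases hp : p.1 = k
        · simp [hp, hc]
        · simp [hp, cancelCond_erase a b k p.1 hp,
            show (p.1 == k) = false by simpa using hp]
      rw [hpred a, hpred b]
    · have hstep : (if (a, b).2.contains k = true then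
          if (a, b).1.getD k 0 = (a, b).2.getD k 0 then ((a, b).1.erase k, (a, b).2.erase k)
          else (a, b) else (a, b)) = (a, b) := by
        by_cases hbc : b.contains k
        · have : ¬ a.getD k 0 = b.getD k 0 := by
            intro he; exact hc (by simp [cancelCond, hbc, he])
          simp [hbc, this]
        · simp [hbc]
      rw [hstep, ih hrest]
      have hpred : ∀ (d : PySem.Dict Char Int),
          d.items.filter (fun p => !(rest.contains p.1 && cancelCond a b p.1))
            = d.items.filter (fun p => !((k :: rest).contains p.1 && cancelCond a b p.1)) := by
        intro d
        apply List.filter_congr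
        intro p _
        by_cases hp : p.1 = k
        · simp [hp, hc, hk]
        · simp [hp]
      rw [hpred a, hpred b]

lemma sum_filter_map_eq (l : List Char) (p : Char → Bool) (g : Char → Int)
    (h : ∀ x ∈ l, p x = false → g x = 0) :
    ((l.filter p).map g).sum = (l.map g).sum := by
  induction l with
  | nil => rfl
  | cons x xs ih =>
    have ih' := ih (fun y hy => h y (List.mem_cons_of_mem x hy))
    by_cases hx : p x
    · simp [hx, ih']
    · simp [hx, ih', h x (List.mem_cons_self) (by simpa using hx)]

lemma dict_keymap_keys (ks : List Char) (v : Char → Int) :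
    (PySem.Dict.mk (ks.map (fun k => (k, v k)))).keys = ks := by
  simp [PySem.Dict.keys, List.map_map, Function.comp_def]

lemma dict_keymap_getD (ks : List Char) (v : Char → Int) (hnd : ks.Nodup) (k : Char)
    (hk : k ∈ ks) : (PySem.Dict.mk (ks.map (fun k => (k, v k)))).getD k 0 = v k := by
  have hm : (k, v k) ∈ ks.map (fun k => (k, v k)) := List.mem_map_of_mem hk
  have hn : (PySem.Dict.mk (ks.map (fun k => (k, v k)))).keys.Nodup := by
    rw [dict_keymap_keys]; exact hnd
  exact PySem.Dict.getD_of_mem_items _ hm hn 0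

lemma dict_keymap_contains (ks : List Char) (v : Char → Int) (k : Char) :
    (PySem.Dict.mk (ks.map (fun k => (k, v k)))).contains k = decide (k ∈ ks) := by
  rw [PySem.Dict.contains_eq_decide_mem_keys, dict_keymap_keys]

def condC (l1 l2 : List Char) (k : Char) : Bool :=
  !(List.contains (PySem.Set.ofList l1) k &&
    cancelCond (PySem.Dict.counter l1) (PySem.Dict.counter l2) k)

def keyL (l1 l2 ls : List Char) : List Char := (PySem.Set.ofList ls).filter (condC l1 l2)

def dD (l1 l2 ls : List Char) : PySem.Dict Char Int :=
  PySem.Dict.mk ((keyL l1 l2 ls).map (fun k => (k, (List.count k ls : Int))))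

lemma items_side (l1 l2 ls : List Char) :
    PySem.Dict.mk ((PySem.Dict.counter ls).items.filter
        (fun p => !(List.contains (PySem.Set.ofList l1) p.1 &&
          cancelCond (PySem.Dict.counter l1) (PySem.Dict.counter l2) p.1)))
      = dD l1 l2 ls := by
  unfold dD keyL condC
  rw [PySem.Dict.items_counter, List.filter_map]
  rfl

lemma nodup_keyL (l1 l2 ls : List Char) : (keyL l1 l2 ls).Nodup :=
  (PySem.Set.nodup_ofList ls).filter _

lemma mem_keyL (l1 l2 ls : List Char) (k : Char) :
    k ∈ keyL l1 l2 ls ↔ k ∈ PySem.Set.ofList ls ∧ condC l1 l2 k = true := List.mem_filter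

lemma getD_dD (l1 l2 ls : List Char) (k : Char) (hk : k ∈ keyL l1 l2 ls) :
    (dD l1 l2 ls).getD k 0 = (List.count k ls : Int) :=
  dict_keymap_getD _ _ (nodup_keyL l1 l2 ls) k hk

lemma contains_dD (l1 l2 ls : List Char) (k : Char) :
    (dD l1 l2 ls).contains k = decide (k ∈ keyL l1 l2 ls) :=
  dict_keymap_contains _ _ k

lemma core (l1 l2 : List Char) :
    (let d1 := PySem.Dict.counter l1
     let d2 := PySem.Dict.counter l2
     let st := (PySem.Set.ofList l1).foldl (fun s key =>
        if s.2.contains key = true then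
          if s.1.getD key 0 = s.2.getD key 0 then (s.1.erase key, s.2.erase key) else s
        else s) (d1, d2)
     let ds := st.1.keys.foldl (fun acc key =>
        if st.2.contains key = true then acc + |st.1.getD key 0 - st.2.getD key 0|
        else acc + st.1.getD key 0) (0:Int)
     st.2.keys.foldl (fun acc key =>
        if (!st.1.contains key) = true then acc + st.2.getD key 0 else acc) ds)
    = ((PySem.List.dedup (l1 ++ l2)).map
        (fun ch => |((l1.count ch : Int)) - ((l2.count ch : Int))|)).sum := by
  simp only []
  rw [cancel_fold _ (PySem.Set.nodup_ofList l1)]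
  rw [show (PySem.Dict.mk ((PySem.Dict.counter l1).items.filter
      (fun p => !(List.contains (PySem.Set.ofList l1) p.1 &&
        cancelCond (PySem.Dict.counter l1) (PySem.Dict.counter l2) p.1))),
      PySem.Dict.mk ((PySem.Dict.counter l2).items.filter
      (fun p => !(List.contains (PySem.Set.ofList l1) p.1 &&
        cancelCond (PySem.Dict.counter l1) (PySem.Dict.counter l2) p.1))))
      = (dD l1 l2 l1, dD l1 l2 l2) by
    rw [items_side l1 l2 l1, items_side l1 l2 l2]]
  have keys_dD : ∀ ls, (dD l1 l2 ls).keys = keyL l1 l2 ls := fun ls => dict_keymap_keys _ _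
  simp only [keys_dD]
  -- first inner fold
  have h1 : ∀ key ∈ keyL l1 l2 l1, ∀ acc : Int,
      (if (dD l1 l2 l2).contains key = true
        then acc + |(dD l1 l2 l1).getD key 0 - (dD l1 l2 l2).getD key 0|
        else acc + (dD l1 l2 l1).getD key 0)
      = acc + |((List.count key l1 : Int)) - ((List.count key l2 : Int))| := by
    intro key hk acc
    obtain ⟨hS1, hcd⟩ := (mem_keyL l1 l2 l1 key).mp hk
    rw [contains_dD, getD_dD l1 l2 l1 key hk]
    by_cases hm2 : key ∈ PySem.Set.ofList l2
    · have hk2 : key ∈ keyL l1 l2 l2 := (mem_keyL l1 l2 l2 key).mpr ⟨hm2, hcd⟩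
      rw [getD_dD l1 l2 l2 key hk2]
      simp [hk2]
    · have hk2 : key ∉ keyL l1 l2 l2 := fun h => hm2 ((mem_keyL l1 l2 l2 key).mp h).1
      have hc0 : List.count key l2 = 0 :=
        List.count_eq_zero.mpr (fun h => hm2 ((PySem.Set.mem_ofList l2 key).mpr h))
      simp [hk2, hc0, abs_of_nonneg (Int.natCast_nonneg (List.count key l1))]
  have h2 : ∀ key ∈ keyL l1 l2 l2, ∀ acc : Int,
      (if (!(dD l1 l2 l1).contains key) = true then acc + (dD l1 l2 l2).getD key 0 else acc)
      = acc + (if key ∈ PySem.Set.ofList l1 then (0:Int)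
               else |((List.count key l1 : Int)) - ((List.count key l2 : Int))|) := by
    intro key hk acc
    obtain ⟨hS2, hcd⟩ := (mem_keyL l1 l2 l2 key).mp hk
    rw [contains_dD]
    by_cases hm1 : key ∈ PySem.Set.ofList l1
    · have hk1 : key ∈ keyL l1 l2 l1 := (mem_keyL l1 l2 l1 key).mpr ⟨hm1, hcd⟩
      simp [hk1, hm1]
    · have hk1 : key ∉ keyL l1 l2 l1 := fun h => hm1 ((mem_keyL l1 l2 l1 key).mp h).1
      have hc0 : List.count key l1 = 0 :=
        List.count_eq_zero.mpr (fun h => hm1 ((PySem.Set.mem_ofList l1 key).mpr h))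
      rw [getD_dD l1 l2 l2 key hk]
      simp [hk1, hm1, hc0, abs_of_nonneg (Int.natCast_nonneg (List.count key l2))]
  rw [PySem.List.foldl_congr_mem' (keyL l1 l2 l1) _
      (fun acc key => acc + |((List.count key l1 : Int)) - ((List.count key l2 : Int))|) 0 h1,
    PySem.List.foldl_add]
  rw [PySem.List.foldl_congr_mem' (keyL l1 l2 l2) _
      (fun acc key => acc + (if key ∈ PySem.Set.ofList l1 then (0:Int)
        else |((List.count key l1 : Int)) - ((List.count key l2 : Int))|)) _ h2,
    PySem.List.foldl_add]
  have hded : PySem.List.dedup (l1 ++ l2)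
      = PySem.Set.ofList l1 ++ (PySem.Set.ofList l2).filter
          (fun y => !(List.contains (PySem.Set.ofList l1) y)) := by
    show PySem.Set.ofList (l1 ++ l2) = _
    rw [PySem.Set.ofList_append, PySem.Set.update_eq_append_filter]
    simp [PySem.Set.contains_eq_listContains]
  rw [hded, List.map_append, List.sum_append]
  have eq1 : ((keyL l1 l2 l1).map
        (fun key => |((List.count key l1 : Int)) - ((List.count key l2 : Int))|)).sum
      = ((PySem.Set.ofList l1).map
        (fun key => |((List.count key l1 : Int)) - ((List.count key l2 : Int))|)).sum := by
    apply sum_filter_map_eq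
    intro x hx hcf
    have hAB : (List.contains (PySem.Set.ofList l1) x &&
        cancelCond (PySem.Dict.counter l1) (PySem.Dict.counter l2) x) = true := by
      simpa [condC] using hcf
    have hB := (Bool.and_eq_true_iff.mp hAB).2
    obtain ⟨-, hcnt⟩ : (PySem.Dict.counter l2).contains x = true
        ∧ List.count x l1 = List.count x l2 := by simpa [cancelCond] using hB
    simp [hcnt]
  have eq2 : ((keyL l1 l2 l2).map
        (fun key => if key ∈ PySem.Set.ofList l1 then (0:Int)
          else |((List.count key l1 : Int)) - ((List.count key l2 : Int))|)).sum
      = (((PySem.Set.ofList l2).filter (fun y => !(List.contains (PySem.Set.ofList l1) y))).map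
          (fun ch => |((List.count ch l1 : Int)) - ((List.count ch l2 : Int))|)).sum := by
    rw [← sum_filter_map_eq (keyL l1 l2 l2) (fun k => !(List.contains (PySem.Set.ofList l1) k))
        (fun key => if key ∈ PySem.Set.ofList l1 then (0:Int)
          else |((List.count key l1 : Int)) - ((List.count key l2 : Int))|)
        (fun x hx hfx => by
          have hxm : x ∈ PySem.Set.ofList l1 := by simpa using hfx
          simp [hxm])]
    have hstep2 : (keyL l1 l2 l2).filter (fun k => !(List.contains (PySem.Set.ofList l1) k))
        = (PySem.Set.ofList l2).filter (fun y => !(List.contains (PySem.Set.ofList l1) y)) := by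
      unfold keyL
      rw [List.filter_filter]
      apply List.filter_congr
      intro x hx
      by_cases hm : x ∈ PySem.Set.ofList l1
      · simp [hm]
      · simp [condC, hm]
    rw [hstep2]
    refine congrArg List.sum (List.map_congr_left ?_)
    intro x hx
    have hxm : x ∉ PySem.Set.ofList l1 := by
      have := (List.mem_filter.mp hx).2
      simpa using this
    simp [hxm]
  rw [eq1, eq2]
  omega

-- B-side: the removal fold computes the truncated multiset difference.
lemma fold_erase_coe (s2 s1 : List Char) :
    ((s2.foldl (fun rest ch => if rest.contains ch then rest.erase ch else rest) s1 : List Char)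
      : Multiset Char) = (s1 : Multiset Char) - (s2 : Multiset Char) := by
  induction s2 generalizing s1 with
  | nil => simp
  | cons a t ih =>
    have hstep : (((if s1.contains a then s1.erase a else s1) : List Char) : Multiset Char)
        = (s1 : Multiset Char).erase a := by
      by_cases h : s1.contains a
      · rw [if_pos h, ← Multiset.coe_erase]
      · have hna : a ∉ s1 := by simpa using h
        rw [if_neg h, Multiset.erase_of_notMem (by simpa using hna)]
    calc ((List.foldl (fun rest ch => if rest.contains ch then rest.erase ch else rest)
            (if s1.contains a then s1.erase a else s1) t : List Char) : Multiset Char)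
        = ((if s1.contains a then s1.erase a else s1 : List Char) : Multiset Char)
            - (t : Multiset Char) := ih _
      _ = (s1 : Multiset Char).erase a - (t : Multiset Char) := by rw [hstep]
      _ = (s1 : Multiset Char) - ((a :: t : List Char) : Multiset Char) := by
            rw [← Multiset.sub_cons]; rfl

lemma sum_count_eq_card (D : List Char) (hnd : D.Nodup) (m : Multiset Char)
    (hsub : ∀ a, a ∈ m → a ∈ D) :
    (D.map (fun ch => m.count ch)).sum = Multiset.card m := by
  rw [← List.sum_toFinset _ hnd]
  exact Multiset.sum_count_eq_card (fun a ha => List.mem_toFinset.mpr (hsub a ha))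

lemma sum_map_add_nat (D : List Char) (f g : Char → ℕ) :
    (D.map (fun ch => f ch + g ch)).sum = (D.map f).sum + (D.map g).sum := by
  induction D with
  | nil => rfl
  | cons x xs ih => simp [ih]; omega

lemma sum_map_cast (D : List Char) (f : Char → Int) (g : Char → ℕ)
    (h : ∀ ch ∈ D, f ch = ((g ch : ℕ) : Int)) :
    (D.map f).sum = (((D.map g).sum : ℕ) : Int) := by
  induction D with
  | nil => rfl
  | cons x xs ih =>
    simp only [List.map_cons, List.sum_cons, h x List.mem_cons_self,
      ih (fun y hy => h y (List.mem_cons_of_mem x hy))]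
    push_cast
    ring

lemma bridge (l1 l2 : List Char) (h : l1.length = l2.length) :
    (((PySem.List.dedup (l1 ++ l2)).map
        (fun ch => |((l1.count ch : Int)) - ((l2.count ch : Int))|)).sum == (2:Int))
    = ((l2.foldl (fun rest ch => if rest.contains ch then rest.erase ch else rest) l1).length
        == 1) := by
  set D := PySem.List.dedup (l1 ++ l2) with hD
  have hndD : D.Nodup := PySem.Set.nodup_ofList _
  have hmemD : ∀ a : Char, a ∈ l1 ++ l2 → a ∈ D := by
    intro a ha
    exact (PySem.Set.mem_ofList _ a).mpr ha
  set m1 : Multiset Char := (l1 : Multiset Char) with hm1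
  set m2 : Multiset Char := (l2 : Multiset Char) with hm2
  have hpt : ∀ ch : Char,
      |((l1.count ch : Int)) - ((l2.count ch : Int))|
        = (((m1 - m2).count ch + (m2 - m1).count ch : ℕ) : Int) := by
    intro ch
    have e1 : (m1 - m2).count ch = l1.count ch - l2.count ch := by
      rw [Multiset.count_sub, hm1, hm2, Multiset.coe_count, Multiset.coe_count]
    have e2 : (m2 - m1).count ch = l2.count ch - l1.count ch := by
      rw [Multiset.count_sub, hm1, hm2, Multiset.coe_count, Multiset.coe_count]
    rw [e1, e2]
    rcases le_total (l1.count ch) (l2.count ch) with hle | hle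
    · rw [abs_of_nonpos (by omega : ((l1.count ch : Int)) - ((l2.count ch : Int)) ≤ 0)]
      omega
    · rw [abs_of_nonneg (by omega : (0:Int) ≤ ((l1.count ch : Int)) - ((l2.count ch : Int)))]
      omega
  have hsum : (D.map (fun ch => |((l1.count ch : Int)) - ((l2.count ch : Int))|)).sum
      = (((D.map (fun ch => (m1 - m2).count ch + (m2 - m1).count ch)).sum : ℕ) : Int) :=
    sum_map_cast D _ _ (fun ch _ => hpt ch)
  have hc1 : (D.map (fun ch => (m1 - m2).count ch)).sum = Multiset.card (m1 - m2) := by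
    refine sum_count_eq_card D hndD _ (fun a ha => hmemD a ?_)
    have : a ∈ m1 := Multiset.mem_of_le (Multiset.sub_le_self _ _) ha
    exact List.mem_append_left l2 (by simpa [hm1] using this)
  have hc2 : (D.map (fun ch => (m2 - m1).count ch)).sum = Multiset.card (m2 - m1) := by
    refine sum_count_eq_card D hndD _ (fun a ha => hmemD a ?_)
    have : a ∈ m2 := Multiset.mem_of_le (Multiset.sub_le_self _ _) ha
    exact List.mem_append_right l1 (by simpa [hm2] using this)
  have hcards : Multiset.card (m1 - m2) = Multiset.card (m2 - m1) := by
    have c1 := congrArg Multiset.card (Multiset.sub_add_inter m1 m2)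
    have c2 := congrArg Multiset.card (Multiset.sub_add_inter m2 m1)
    rw [Multiset.card_add] at c1 c2
    have hic : m1 ∩ m2 = m2 ∩ m1 := Multiset.inter_comm m1 m2
    have hcm : Multiset.card m1 = Multiset.card m2 := by
      simpa [hm1, hm2] using h
    rw [hic] at c1
    omega
  have hlen : (l2.foldl (fun rest ch => if rest.contains ch then rest.erase ch else rest)
      l1).length = Multiset.card (m1 - m2) := by
    rw [← Multiset.coe_card, fold_erase_coe]
  rw [hsum, sum_map_add_nat, hc1, hc2, hlen, ← hcards]
  rcases eq_or_ne (Multiset.card (m1 - m2)) 1 with he | he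
  · simp [he]
  · have hne : ¬ (((Multiset.card (m1 - m2) : ℕ) : Int) + ((Multiset.card (m1 - m2) : ℕ) : Int)
        = 2) := by omega
    simp [he, hne]

theorem ab_eq (text1 text2 : String) : is_blanagram text1 text2 = is_blanagram_alt text1 text2 := by
  unfold is_blanagram is_blanagram_alt
  simp only [text_process_eq, count_fold_eq, PySem.Dict.keys_counter]
  split_ifs with h
  · rfl
  · rw [core ((text1.toList.filter PySem.Chars.isalpha).map PySem.Chars.lowerChar)
        ((text2.toList.filter PySem.Chars.isalpha).map PySem.Chars.lowerChar)]
    exact bridge _ _ (by omega)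

-- ===== VERDICT (by name: the statement is the Claim_ definition above) =====
theorem is_blanagram_spec : Claim_equal_is_blanagram := by
  intro text1 text2 _
  unfold Spec_is_blanagram
  exact ab_eq text1 text2
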